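-- pv_equiv track=rewrite | github.com/Azizbek201798/HomeWorks_NajotTa-lim | Month_4/Abstraction/homework/codeWars_Medium_3.py | pop_blocks
-- ===== SOURCE A (Python) =====
-- def pop_blocks(blocks):
--     massiv = []
--
--     for block in blocks:
--         if massiv and block == massiv[-1]:
--             while massiv and block == massiv[-1]:
--                 massiv.pop()
--         else:
--             massiv.append(block)
--
--     return massiv
-- ===== SOURCE B (Python) =====
-- def pop_blocks(blocks):
--     lst = list(blocks)
--     i = _find_adjacent(lst)
--     while i is not None:
--         del lst[i:i + 2]
--         i = _find_adjacent(lst)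
--     return lst
--
--
-- def _find_adjacent(lst):
--     for i in range(len(lst) - 1):
--         if lst[i] == lst[i + 1]:
--             return i
--     return None
-- ===== Notes on version B (the rewrite author's own statement) =====
-- stated objective: alternative
-- what changed: Replaces the stack-with-inner-while pass by repeated scanning of a list copy for the first adjacent equal pair and deleting it in place until no pair remains.
import Mathlib
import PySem

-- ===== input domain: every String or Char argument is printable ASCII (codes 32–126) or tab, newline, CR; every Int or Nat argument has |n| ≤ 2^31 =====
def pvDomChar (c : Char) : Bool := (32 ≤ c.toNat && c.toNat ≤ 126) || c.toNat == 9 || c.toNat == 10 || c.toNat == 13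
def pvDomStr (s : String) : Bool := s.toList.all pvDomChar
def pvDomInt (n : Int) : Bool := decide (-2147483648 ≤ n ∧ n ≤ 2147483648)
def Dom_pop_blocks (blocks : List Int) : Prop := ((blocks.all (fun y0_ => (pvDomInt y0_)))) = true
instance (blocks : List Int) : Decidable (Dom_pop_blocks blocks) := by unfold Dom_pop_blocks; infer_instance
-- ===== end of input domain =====

-- B collapses adjacent equal pairs by repeatedly deleting the first such pair from a list copy until none remains, instead of A's stack pass; alternative decomposition (quadratic in the worst case).

-- scan of Source B's _find_adjacent: first index with lst[i] == lst[i+1], as structural recursion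
def findAdj : List Int → Option Nat
  | [] => none
  | [_] => none
  | a :: b :: rest => if a = b then some 0 else (findAdj (b :: rest)).map (· + 1)

-- termination facts cited by the ports (by name, to keep the recursion auxiliaries small)
theorem pyPopWhile_dec (m : List Int) (h : m ≠ []) : m.dropLast.length < m.length := by
  have : m.length ≠ 0 := fun hl => h (List.eq_nil_of_length_eq_zero hl)
  rw [List.length_dropLast]; omega

theorem findAdj_le (xs : List Int) (i : Nat) (h : findAdj xs = some i) : i + 2 ≤ xs.length := by
  induction xs generalizing i with
  | nil => simp [findAdj] at h
  | cons a xs ih =>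
    match xs with
    | [] => simp [findAdj] at h
    | b :: rest =>
      simp only [findAdj] at h
      split at h
      · cases h; simp
      · simp only [Option.map_eq_some_iff] at h
        obtain ⟨j, hj, rfl⟩ := h
        have := ih j hj
        simp at this ⊢
        omega

theorem delAdj_len (xs : List Int) (i : Nat) (h : i + 2 ≤ xs.length) :
    (xs.take i ++ xs.drop (i + 2)).length < xs.length := by
  rw [List.length_append, List.length_take, List.length_drop]; omega

-- ===== PORT A =====
-- inner `while massiv and block == massiv[-1]: massiv.pop()`
def pyPopWhile (block : Int) (massiv : List Int) : List Int :=
  if massiv ≠ [] ∧ massiv.getLast? = some block then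
    pyPopWhile block massiv.dropLast
  else massiv
termination_by massiv.length
decreasing_by
  rename_i h
  exact pyPopWhile_dec massiv h.1

def pop_blocks (blocks : List Int) : List Int :=
  blocks.foldl (fun massiv block =>
    if massiv ≠ [] ∧ massiv.getLast? = some block then pyPopWhile block massiv
    else massiv ++ [block]) []

-- ===== PORT B =====
-- outer loop of Source B: delete the found pair `del lst[i:i+2]`, rescan; stop when no adjacent pair
def cancelLoop (lst : List Int) : List Int :=
  match _hf : findAdj lst with
  | none => lst
  | some i => cancelLoop (lst.take i ++ lst.drop (i + 2))
termination_by lst.length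
decreasing_by exact delAdj_len lst i (findAdj_le lst i _hf)

def pop_blocks_alt (blocks : List Int) : List Int := cancelLoop blocks

-- ===== PRECONDITION & SPEC =====
def Spec_pop_blocks (blocks : List Int) (out : List Int) : Prop := out = pop_blocks_alt blocks
instance (blocks : List Int) (out : List Int) : Decidable (Spec_pop_blocks blocks out) := by unfold Spec_pop_blocks; infer_instance

-- ===== CLAIM (what is proved, stated in full; the proofs are below) =====
def Claim_equal_pop_blocks : Prop := ∀ (blocks : List Int), Dom_pop_blocks blocks → Spec_pop_blocks blocks (pop_blocks blocks)

-- ===== LEMMAS AND PROOFS =====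

-- "no adjacent equal elements"
def NA (l : List Int) : Prop := List.IsChain (fun a b : Int => a ≠ b) l

theorem exists_concat (m : List Int) (h : m ≠ []) : ∃ p a, m = p ++ [a] := by
  rcases List.eq_nil_or_concat m with h0 | ⟨p, a, hm⟩
  · exact absurd h0 h
  · exact ⟨p, a, by simpa [List.concat_eq_append] using hm⟩

-- reference machine: one-pop stack step
def step1 (m : List Int) (b : Int) : List Int :=
  if m.getLast? = some b then m.dropLast else m ++ [b]

theorem popWhile_na (b : Int) (m : List Int) (hna : NA m) (hl : m.getLast? = some b) :
    pyPopWhile b m = m.dropLast := by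
  have hne : m ≠ [] := by intro h; subst h; simp at hl
  rw [pyPopWhile]
  simp only [hne, hl, ne_eq, not_false_iff, true_and]
  rw [pyPopWhile]
  have : ¬ (m.dropLast ≠ [] ∧ m.dropLast.getLast? = some b) := by
    rintro ⟨h1, h2⟩
    obtain ⟨m', a, rfl⟩ := exists_concat m hne
    have ha : a = b := by
      have := hl; simpa using this
    rw [List.dropLast_concat] at h1 h2
    obtain ⟨m'', c, rfl⟩ := exists_concat m' h1
    have hc : c = b := by simpa using h2
    have : c ≠ a := by
      have hsuf : NA [c, a] := List.IsChain.suffix hna ⟨m'', by simp⟩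
      exact List.isChain_pair.mp hsuf
    exact this (hc.trans ha.symm)
  simp [this]

theorem step1_na (m : List Int) (b : Int) (hna : NA m) : NA (step1 m b) := by
  unfold step1
  split
  · exact List.IsChain.dropLast hna
  · rename_i h
    rw [NA, List.isChain_append]
    refine ⟨hna, List.isChain_singleton b, ?_⟩
    intro x hx y hy
    simp at hy; subst hy
    intro hxy; subst hxy
    exact h hx

theorem stepA_eq_step1 (m : List Int) (b : Int) (hna : NA m) :
    (if m ≠ [] ∧ m.getLast? = some b then pyPopWhile b m else m ++ [b]) = step1 m b := by
  unfold step1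
  by_cases h : m.getLast? = some b
  · have hne : m ≠ [] := by intro hh; subst hh; simp at h
    simp [h, hne, popWhile_na b m hna h]
  · have : ¬ (m ≠ [] ∧ m.getLast? = some b) := by rintro ⟨_, h2⟩; exact h h2
    simp [h]

theorem foldA_eq_fold1 (xs : List Int) : ∀ (m : List Int), NA m →
    xs.foldl (fun massiv block =>
      if massiv ≠ [] ∧ massiv.getLast? = some block then pyPopWhile block massiv
      else massiv ++ [block]) m = xs.foldl step1 m := by
  induction xs with
  | nil => intro m _; rfl
  | cons x xs ih =>
    intro m hna
    simp only [List.foldl_cons]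
    rw [stepA_eq_step1 m x hna]
    exact ih (step1 m x) (step1_na m x hna)

theorem fold1_na (ys : List Int) : ∀ (m : List Int), NA (m ++ ys) →
    ys.foldl step1 m = m ++ ys := by
  induction ys with
  | nil => intro m _; simp
  | cons y ys ih =>
    intro m hna
    have hlast : ¬ m.getLast? = some y := by
      intro hl
      have h := (List.isChain_append.mp hna).2.2
      exact (h y hl y (by simp) rfl)
    simp only [List.foldl_cons, step1, if_neg hlast]
    have := ih (m ++ [y]) (by simpa using hna)
    simpa using this

-- deleting an adjacent equal pair whose prefix is already collapsed does not change the stack result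
theorem fold1_delete (p q : List Int) (a : Int) (hna : NA (p ++ [a])) :
    (p ++ a :: a :: q).foldl step1 ([] : List Int) = (p ++ q).foldl step1 ([] : List Int) := by
  have hp : NA p := (List.isChain_append.mp hna).1
  have h1 : (p ++ a :: a :: q) = (p ++ [a]) ++ (a :: q) := by simp
  rw [h1, List.foldl_append, fold1_na (p ++ [a]) [] (by simpa using hna)]
  have hstep : step1 ([] ++ (p ++ [a])) a = p := by
    simp [step1]
  simp only [List.foldl_cons, List.nil_append] at hstep ⊢
  rw [hstep]
  rw [List.foldl_append, fold1_na p [] (by simpa using hp)]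
  simp

theorem take_succ_concat (l : List Int) (i : Nat) (h : i < l.length) :
    l.take (i + 1) = l.take i ++ [l[i]] := by
  rw [List.take_add_one]
  simp [List.getElem?_eq_getElem h]

theorem decomp (l : List Int) (i : Nat) (h : i + 1 < l.length) :
    l = l.take i ++ l[i]'(by omega) :: l[i + 1]'h :: l.drop (i + 2) := by
  conv_lhs => rw [← List.take_append_drop i l]
  congr 1
  rw [List.drop_eq_getElem_cons (by omega)]
  congr 1
  rw [List.drop_eq_getElem_cons h]

theorem findAdj_none_na (xs : List Int) (h : findAdj xs = none) : NA xs := by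
  induction xs with
  | nil => exact List.isChain_nil
  | cons a xs ih =>
    match xs with
    | [] => exact List.isChain_singleton a
    | b :: rest =>
      simp only [findAdj] at h
      split at h
      · cases h
      · rename_i hab
        simp only [Option.map_eq_none_iff] at h
        exact List.IsChain.cons_cons hab (ih h)

theorem findAdj_some_spec (xs : List Int) (i : Nat) (h : findAdj xs = some i) :
    ∃ hlt : i + 1 < xs.length,
      xs[i]'(Nat.lt_of_succ_lt hlt) = xs[i + 1]'hlt ∧ NA (xs.take (i + 1)) := by
  induction xs generalizing i with
  | nil => simp [findAdj] at h
  | cons a xs ih =>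
    match xs with
    | [] => simp [findAdj] at h
    | b :: rest =>
      simp only [findAdj] at h
      split at h
      · cases h
        rename_i hab
        exact ⟨by simp, by simpa using hab, List.isChain_singleton a⟩
      · rename_i hab
        simp only [Option.map_eq_some_iff] at h
        obtain ⟨j, hj, rfl⟩ := h
        obtain ⟨hlt, heq, hna⟩ := ih j hj
        refine ⟨by simpa using Nat.succ_lt_succ hlt, by simpa using heq, ?_⟩
        have htk : (a :: b :: rest).take (j + 1 + 1) = a :: (b :: rest).take (j + 1) := rfl
        rw [htk]
        refine List.isChain_cons.mpr ⟨?_, hna⟩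
        intro y hy
        have : (b :: rest).take (j + 1) = b :: rest.take j := rfl
        rw [this] at hy
        simp at hy
        subst hy
        exact hab

theorem cancelLoop_run (lst : List Int) : cancelLoop lst = lst.foldl step1 [] := by
  induction lst using cancelLoop.induct with
  | case1 lst hf =>
    rw [cancelLoop.eq_def]
    split
    · exact (fold1_na lst [] (by simpa using findAdj_none_na lst hf)).symm
    · rename_i j hj
      rw [hf] at hj; cases hj
  | case2 lst i hf ih =>
    rw [cancelLoop.eq_def]
    split
    · rename_i hj; rw [hf] at hj; cases hj
    rename_i j hj
    rw [hf] at hj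
    injection hj with hj; subst hj
    rw [ih]
    obtain ⟨hlt, heq, hna⟩ := findAdj_some_spec lst i hf
    have hdec := decomp lst i hlt
    have hnaP : NA (lst.take i ++ [lst[i]'(Nat.lt_of_succ_lt hlt)]) := by
      rw [← take_succ_concat lst i (Nat.lt_of_succ_lt hlt)]; exact hna
    conv_rhs => rw [hdec, ← heq]
    exact (fold1_delete (lst.take i) (lst.drop (i + 2)) _ hnaP).symm

-- ===== VERDICT (by name: the statement is the Claim_ definition above) =====
theorem pop_blocks_spec : Claim_equal_pop_blocks := by
  intro blocks _
  unfold Spec_pop_blocks pop_blocks pop_blocks_alt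
  rw [foldA_eq_fold1 blocks [] List.isChain_nil]
  exact (cancelLoop_run blocks).symm
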